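-- pv_equiv track=rewrite | github.com/mjh09/python-code-practice | digit_prefix.py | longestDigitsPrefix
-- ===== SOURCE A (Python) =====
-- def longestDigitsPrefix(inputString):
--     """
--     Returns the numeric prefix of a string if present
--
--     Parameters:
--         inputString (str)
--
--     Returns:
--         current (str) : numeric prefix or empty
--     """
--
--     current = ''
--     previous = None
--
--     for elem in inputString:
--
--         is_digit = ord(elem) in range(48, 58) # "0" -> "9"
--
--         if is_digit:
--             current += elem
--             previous = elem
--             continue
--
--         elif previous:
--             return current
--
--         else:
--             return current
--
--     return current
-- ===== SOURCE B (Python) =====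
-- import re
--
-- def longestDigitsPrefix(inputString):
--     return re.match(r'[0-9]*', inputString).group()
-- ===== Notes on version B (the rewrite author's own statement) =====
-- stated objective: idiomatic
-- what changed: Replaces the explicit character loop with accumulator and early returns by a single anchored regex match r'[0-9]*' whose group is the digit prefix.
import Mathlib
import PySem

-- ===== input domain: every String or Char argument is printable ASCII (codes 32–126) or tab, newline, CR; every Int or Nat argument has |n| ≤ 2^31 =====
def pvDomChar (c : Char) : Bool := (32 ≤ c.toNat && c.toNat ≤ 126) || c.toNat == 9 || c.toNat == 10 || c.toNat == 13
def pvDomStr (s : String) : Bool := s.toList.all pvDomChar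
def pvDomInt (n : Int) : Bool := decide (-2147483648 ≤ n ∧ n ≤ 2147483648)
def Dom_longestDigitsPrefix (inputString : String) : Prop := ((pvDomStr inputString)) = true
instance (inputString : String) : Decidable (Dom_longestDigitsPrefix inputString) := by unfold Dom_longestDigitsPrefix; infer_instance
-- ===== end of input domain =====

-- B replaces A's explicit loop with early returns by one anchored regex match (ported as a takeWhile); objective: idiomatic.


-- ===== PORT A =====
-- loop over the characters, keeping `current` and `previous`; both non-digit branches return `current`
def longestDigitsPrefixGo : List Char → String → Option Char → String
  | [], current, _ => current
  | elem :: rest, current, previous =>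
    let is_digit : Bool := 48 ≤ elem.toNat && elem.toNat < 58   -- ord(elem) in range(48, 58)
    if is_digit then
      longestDigitsPrefixGo rest (current.push elem) (some elem)
    else
      match previous with
      | some _ => current      -- elif previous: return current
      | none => current        -- else: return current

def longestDigitsPrefix (inputString : String) : String :=
  longestDigitsPrefixGo inputString.toList "" none

-- ===== PORT B =====
-- re.match(r'[0-9]*', s).group(): the longest run of ASCII digits anchored at the start
def longestDigitsPrefix_alt (inputString : String) : String :=
  String.ofList (inputString.toList.takeWhile (fun c => 48 ≤ c.toNat && c.toNat < 58))

-- ===== PRECONDITION & SPEC =====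
def Spec_longestDigitsPrefix (inputString : String) (out : String) : Prop := out = longestDigitsPrefix_alt inputString
instance (inputString : String) (out : String) : Decidable (Spec_longestDigitsPrefix inputString out) := by unfold Spec_longestDigitsPrefix; infer_instance

-- ===== CLAIM (what is proved, stated in full; the proofs are below) =====
def Claim_equal_longestDigitsPrefix : Prop := ∀ (inputString : String), Dom_longestDigitsPrefix inputString → Spec_longestDigitsPrefix inputString (longestDigitsPrefix inputString)

-- ===== LEMMAS AND PROOFS =====
theorem longestDigitsPrefixGo_eq (l : List Char) :
    ∀ (cur : String) (prev : Option Char),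
      longestDigitsPrefixGo l cur prev
        = cur ++ String.ofList (l.takeWhile (fun c => 48 ≤ c.toNat && c.toNat < 58)) := by
  induction l with
  | nil =>
    intro cur prev
    apply String.toList_inj.mp
    simp [longestDigitsPrefixGo]
  | cons c rest ih =>
    intro cur prev
    by_cases h : (48 ≤ c.toNat && c.toNat < 58) = true
    · simp only [longestDigitsPrefixGo, h, if_pos, ih]
      apply String.toList_inj.mp
      simp [h]
    · simp only [longestDigitsPrefixGo, h, Bool.false_eq_true, if_false]
      cases prev <;>
        (apply String.toList_inj.mp; simp [h])

-- ===== VERDICT (by name: the statement is the Claim_ definition above) =====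
theorem longestDigitsPrefix_spec : Claim_equal_longestDigitsPrefix := by
  intro s _
  unfold Spec_longestDigitsPrefix longestDigitsPrefix longestDigitsPrefix_alt
  rw [longestDigitsPrefixGo_eq]
  apply String.toList_inj.mp
  simp
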